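-- pv_equiv track=rewrite | github.com/MayasirSulduz/TestCaseGenerator | backend/app.py | extract_coverage_table
-- ===== SOURCE A (Python) =====
-- def extract_coverage_table(output):
--     """Extract coverage table from pytest output"""
--     lines = output.split('\n')
--     table_lines = []
--     in_table = False
--
--     for line in lines:
--         if '-----' in line or ('Name' in line and 'Stmts' in line):
--             in_table = True
--         if in_table:
--             if line.strip() == '' and table_lines:
--                 break
--             if line.strip():
--                 table_lines.append(line)
--
--     return '\n'.join(table_lines) if table_lines else 'Coverage table not found'
-- ===== SOURCE B (Python) =====
-- def extract_coverage_table(output):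
--     """Extract coverage table from pytest output"""
--     lines = output.split('\n')
--     start = None
--     for i, line in enumerate(lines):
--         if '-----' in line or ('Name' in line and 'Stmts' in line):
--             start = i
--             break
--     if start is None:
--         return 'Coverage table not found'
--     block = []
--     for line in lines[start:]:
--         if line.strip() == '':
--             break
--         block.append(line)
--     return '\n'.join(block)
-- ===== Notes on version B (the rewrite author's own statement) =====
-- stated objective: simpler
-- what changed: Replaces the single stateful scan (in_table flag, conditional break tied to accumulator emptiness) by a two-phase decomposition: find the index of the first trigger line, then take the contiguous non-blank block from there; equivalence rests on the fact that a trigger line is never blank.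
import Mathlib
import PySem

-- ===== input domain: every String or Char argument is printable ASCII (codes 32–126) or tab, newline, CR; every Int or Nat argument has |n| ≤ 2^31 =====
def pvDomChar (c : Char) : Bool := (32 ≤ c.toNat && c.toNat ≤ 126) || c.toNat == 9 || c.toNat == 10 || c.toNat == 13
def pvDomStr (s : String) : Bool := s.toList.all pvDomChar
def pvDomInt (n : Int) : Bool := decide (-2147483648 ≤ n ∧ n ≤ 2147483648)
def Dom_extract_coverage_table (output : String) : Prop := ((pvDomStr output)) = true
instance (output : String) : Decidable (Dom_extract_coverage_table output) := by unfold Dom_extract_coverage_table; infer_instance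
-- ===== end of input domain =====

-- B replaces A's single stateful scan (in_table flag, break tied to the accumulator)
-- by a find-the-trigger-index phase followed by taking the non-blank block: simpler decomposition, same cost.

-- ===== PORT A =====
-- shared trigger test: '-----' in line or ('Name' in line and 'Stmts' in line)
def pvTrigger (line : String) : Bool :=
  PySem.Str.isIn "-----" line || (PySem.Str.isIn "Name" line && PySem.Str.isIn "Stmts" line)

-- A's for-loop with state (table_lines, in_table); returning acc models `break`
def pvLoopA : List String → List String → Bool → List String
  | [], acc, _ => acc
  | line :: rest, acc, inTable =>
    let inTable := if pvTrigger line then true else inTable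
    if inTable then
      if PySem.Str.strip line == "" && !acc.isEmpty then acc
      else if !(PySem.Str.strip line == "") then pvLoopA rest (acc ++ [line]) inTable
      else pvLoopA rest acc inTable
    else pvLoopA rest acc inTable

def extract_coverage_table (output : String) : String :=
  let lines := (PySem.Str.split? output "\n").getD []
  let tableLines := pvLoopA lines [] false
  if tableLines.isEmpty then "Coverage table not found" else PySem.Str.join "\n" tableLines

-- ===== PORT B =====
-- first loop of Source B: index of the first trigger line, none if absent
def pvFindStart : List String → Option Nat
  | [] => none
  | line :: rest => if pvTrigger line then some 0 else (pvFindStart rest).map (· + 1)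

-- second loop of Source B: collect lines until the first blank one
def pvTakeBlock : List String → List String
  | [] => []
  | line :: rest => if PySem.Str.strip line == "" then [] else line :: pvTakeBlock rest

def extract_coverage_table_alt (output : String) : String :=
  let lines := (PySem.Str.split? output "\n").getD []
  match pvFindStart lines with
  | none => "Coverage table not found"
  | some start => PySem.Str.join "\n" (pvTakeBlock (lines.drop start))

-- ===== PRECONDITION & SPEC =====
def Spec_extract_coverage_table (output : String) (out : String) : Prop := out = extract_coverage_table_alt output
instance (output : String) (out : String) : Decidable (Spec_extract_coverage_table output out) := by unfold Spec_extract_coverage_table; infer_instance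

-- ===== CLAIM (what is proved, stated in full; the proofs are below) =====
def Claim_equal_extract_coverage_table : Prop := ∀ (output : String), Dom_extract_coverage_table output → Spec_extract_coverage_table output (extract_coverage_table output)

-- ===== LEMMAS AND PROOFS =====

-- a line containing a non-space character does not strip to ""
theorem pv_strip_ne_of_mem {line : String} {c : Char}
    (hc : c ∈ line.toList) (hcs : PySem.Chars.isspace c = false) :
    PySem.Str.strip line ≠ "" := by
  intro h
  have hnil : PySem.Chars.strip line.toList = [] := by
    have := congrArg String.toList h
    simpa [PySem.Str.toList_strip] using this
  have hmem : c ∈ List.dropWhile PySem.Chars.isspace line.toList := by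
    have hsplit : c ∈ List.takeWhile PySem.Chars.isspace line.toList ++
        List.dropWhile PySem.Chars.isspace line.toList := by
      rw [List.takeWhile_append_dropWhile]; exact hc
    rcases List.mem_append.mp hsplit with h1 | h1
    · exact absurd (List.mem_takeWhile_imp h1) (by simp [hcs])
    · exact h1
  have hmem2 : c ∈ PySem.Chars.strip line.toList := by
    unfold PySem.Chars.strip PySem.Chars.rstrip PySem.Chars.lstrip
    have hr : c ∈ (List.dropWhile PySem.Chars.isspace line.toList).reverse :=
      List.mem_reverse.mpr hmem
    have hsplit : c ∈ List.takeWhile PySem.Chars.isspace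
          (List.dropWhile PySem.Chars.isspace line.toList).reverse ++
        List.dropWhile PySem.Chars.isspace
          (List.dropWhile PySem.Chars.isspace line.toList).reverse := by
      rw [List.takeWhile_append_dropWhile]; exact hr
    rcases List.mem_append.mp hsplit with h1 | h1
    · exact absurd (List.mem_takeWhile_imp h1) (by simp [hcs])
    · simpa using h1
  simp [hnil] at hmem2

-- a trigger line is never blank
theorem pv_trigger_strip {line : String} (h : pvTrigger line = true) :
    PySem.Str.strip line ≠ "" := by
  unfold pvTrigger at h
  rcases Bool.or_eq_true_iff.mp h with h1 | h1
  · have hinf : ("-----".toList) <:+: line.toList :=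
      (PySem.Chars.isIn_iff_infix _ _).mp (by simpa [PySem.Str.isIn] using h1)
    exact pv_strip_ne_of_mem (c := '-') (List.IsInfix.mem (by decide) hinf) (by decide)
  · have h2 := (Bool.and_eq_true_iff.mp h1).1
    have hinf : ("Name".toList) <:+: line.toList :=
      (PySem.Chars.isIn_iff_infix _ _).mp (by simpa [PySem.Str.isIn] using h2)
    exact pv_strip_ne_of_mem (c := 'N') (List.IsInfix.mem (by decide) hinf) (by decide)

-- once in the table with a non-empty accumulator, A collects exactly the non-blank block
theorem pv_loopA_in_table (ls : List String) :
    ∀ acc : List String, acc ≠ [] → pvLoopA ls acc true = acc ++ pvTakeBlock ls := by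
  induction ls with
  | nil => intro acc _; simp [pvLoopA, pvTakeBlock]
  | cons line rest ih =>
    intro acc hacc
    by_cases hb : PySem.Str.strip line = ""
    · simp [pvLoopA, pvTakeBlock, hb, hacc]
    · simp [pvLoopA, pvTakeBlock, hb, ih (acc ++ [line]) (by simp)]

-- before any trigger, A accumulates nothing; at the trigger it switches to the block
theorem pv_loopA_start (ls : List String) :
    pvLoopA ls [] false =
      (match pvFindStart ls with
       | none => []
       | some start => pvTakeBlock (ls.drop start)) := by
  induction ls with
  | nil => simp [pvLoopA, pvFindStart]
  | cons line rest ih =>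
    by_cases ht : pvTrigger line = true
    · have hnb := pv_trigger_strip ht
      simp [pvLoopA, pvFindStart, pvTakeBlock, ht, hnb,
        pv_loopA_in_table rest [line] (by simp)]
    · simp only [pvLoopA, ht, Bool.false_eq_true, if_false]
      rw [ih]
      simp only [pvFindStart, ht, Bool.false_eq_true, if_false]
      cases h : pvFindStart rest with
      | none => simp
      | some i => simp

-- the block at a found trigger is non-empty
theorem pv_block_ne_nil {ls : List String} {i : Nat} (h : pvFindStart ls = some i) :
    pvTakeBlock (ls.drop i) ≠ [] := by
  induction ls generalizing i with
  | nil => simp [pvFindStart] at h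
  | cons line rest ih =>
    by_cases ht : pvTrigger line = true
    · simp [pvFindStart, ht] at h
      subst h
      simp [pvTakeBlock, pv_trigger_strip ht]
    · simp [pvFindStart, ht] at h
      rcases h with ⟨j, hj, rfl⟩
      simpa using ih hj

-- ===== VERDICT (by name: the statement is the Claim_ definition above) =====
theorem extract_coverage_table_spec : Claim_equal_extract_coverage_table := by
  intro output _
  unfold Spec_extract_coverage_table extract_coverage_table extract_coverage_table_alt
  simp only [pv_loopA_start]
  cases h : pvFindStart ((PySem.Str.split? output "\n").getD []) with
  | none => simp
  | some i => simp [List.isEmpty_iff, pv_block_ne_nil h]
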